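-- pv_equiv track=rewrite | github.com/junhaalee/Algorithm | problems/1992.py | check
-- ===== SOURCE A (Python) =====
-- def check(temp):
--     str_temp = []
--     for i in range(len(temp)):
--         str_temp += list(temp[i])
--     if len(set(str_temp)) == 1:
--         return True
--     else:
--         return False
-- ===== SOURCE B (Python) =====
-- def check(temp):
--     ref = None
--     for s in temp:
--         for ch in s:
--             if ref is None:
--                 ref = ch
--             elif ch != ref:
--                 return False
--     return ref is not None
-- ===== Notes on version B (the rewrite author's own statement) =====
-- stated objective: faster
-- what changed: B replaces A's flatten-then-build-a-set-and-count strategy with a single early-exit scan that tracks the first character seen as a reference and returns False on the first mismatch (and when no character exists).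
import Mathlib
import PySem

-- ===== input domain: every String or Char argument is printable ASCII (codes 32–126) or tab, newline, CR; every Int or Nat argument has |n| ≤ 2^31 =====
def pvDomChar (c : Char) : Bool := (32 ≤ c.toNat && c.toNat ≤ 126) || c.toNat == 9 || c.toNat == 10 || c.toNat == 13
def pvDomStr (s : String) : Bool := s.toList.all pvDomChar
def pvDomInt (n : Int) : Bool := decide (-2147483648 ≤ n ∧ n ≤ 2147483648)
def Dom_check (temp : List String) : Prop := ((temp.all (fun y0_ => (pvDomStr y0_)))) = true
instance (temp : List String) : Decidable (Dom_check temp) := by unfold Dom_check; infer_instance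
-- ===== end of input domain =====

-- B is a single early-exit reference scan instead of A's flatten-and-set-count; return value only, no mutation.

-- ===== PORT A =====
def check (temp : List String) : Bool :=
  let str_temp : List Char :=
    (PySem.List.pyRange 0 (temp.length : Int) 1).foldl
      (fun acc i => acc ++ (PySem.List.pyGetD temp i "").toList) []
  if PySem.Set.len (PySem.Set.ofList str_temp) == 1 then true else false

-- ===== PORT B =====
-- inner loop over one string's characters: none = early 'return False'
def checkGoChars (ref : Option Char) : List Char → Option (Option Char)
  | [] => some ref
  | c :: rest =>
    match ref with
    | none => checkGoChars (some c) rest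
    | some r => if c == r then checkGoChars (some r) rest else none

-- outer loop over the strings
def checkGoStrs (ref : Option Char) : List String → Option (Option Char)
  | [] => some ref
  | s :: rest =>
    match checkGoChars ref s.toList with
    | none => none
    | some r => checkGoStrs r rest

def check_alt (temp : List String) : Bool :=
  match checkGoStrs none temp with
  | some (some _) => true
  | _ => false

-- ===== PRECONDITION & SPEC =====
def Spec_check (temp : List String) (out : Bool) : Prop := out = check_alt temp
instance (temp : List String) (out : Bool) : Decidable (Spec_check temp out) := by unfold Spec_check; infer_instance

-- ===== CLAIM (what is proved, stated in full; the proofs are below) =====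
def Claim_equal_check : Prop := ∀ (temp : List String), Dom_check temp → Spec_check temp (check temp)

-- ===== LEMMAS AND PROOFS =====

theorem checkGoChars_some (r : Char) (cs : List Char) :
    checkGoChars (some r) cs = if cs.all (· == r) then some (some r) else none := by
  induction cs with
  | nil => simp [checkGoChars]
  | cons c rest ih =>
    simp only [checkGoChars, List.all_cons]
    by_cases h : c = r
    · simp [h, ih]
    · simp [h]

theorem checkGoStrs_eq_flat (ref : Option Char) (temp : List String) :
    checkGoStrs ref temp = checkGoChars ref (temp.flatMap String.toList) := by
  induction temp generalizing ref with
  | nil => rfl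
  | cons s rest ih =>
    simp only [checkGoStrs, List.flatMap_cons]
    have happ : ∀ (l1 l2 : List Char) (r : Option Char),
        checkGoChars r (l1 ++ l2) =
          match checkGoChars r l1 with
          | none => none
          | some r' => checkGoChars r' l2 := by
      intro l1
      induction l1 with
      | nil => intro l2 r; simp [checkGoChars]
      | cons c t iht =>
        intro l2 r
        cases r with
        | none => simp only [List.cons_append, checkGoChars]; exact iht l2 (some c)
        | some x =>
          simp only [List.cons_append, checkGoChars]
          by_cases h : c = x
          · simp only [h, beq_self_eq_true, if_true]; exact iht l2 (some x)
          · simp [h]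
    rw [happ]
    cases h : checkGoChars ref s.toList with
    | none => rfl
    | some r' => exact ih r'

theorem set_len_one_iff (c : Char) (rest : List Char) :
    (PySem.Set.ofList (c :: rest)).length = 1 ↔ rest.all (· == c) = true := by
  have hmem : ∀ y : Char, y ∈ PySem.Set.ofList (c :: rest) ↔ y ∈ (c :: rest) := by
    intro y; simp [PySem.Set.mem_ofList]
  constructor
  · intro h
    obtain ⟨x, hx⟩ := List.length_eq_one_iff.mp h
    have hc : c = x := by
      have := (hmem c).mpr (List.mem_cons_self ..)
      rw [hx] at this; simpa using this
    rw [List.all_eq_true]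
    intro y hy
    have := (hmem y).mpr (List.mem_cons_of_mem _ hy)
    rw [hx] at this
    simp only [List.mem_singleton] at this
    simp [this, hc]
  · intro h
    have hall : ∀ y ∈ PySem.Set.ofList (c :: rest), y = c := by
      intro y hy
      rcases List.mem_cons.mp ((hmem y).mp hy) with h' | h'
      · exact h'
      · have := (List.all_eq_true.mp h) y h'
        simpa using this
    have hnd := PySem.Set.nodup_ofList (xs := c :: rest)
    have hcmem : c ∈ PySem.Set.ofList (c :: rest) := (hmem c).mpr (List.mem_cons_self ..)
    cases hS : PySem.Set.ofList (c :: rest) with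
    | nil => rw [hS] at hcmem; simp at hcmem
    | cons a t =>
      rw [hS] at hall hnd
      have ha : a = c := hall a (List.mem_cons_self ..)
      have ht : t = [] := by
        cases t with
        | nil => rfl
        | cons b u =>
          have hb : b = c := hall b (by simp)
          have : a ∉ (b :: u) := (List.nodup_cons.mp hnd).1
          rw [ha, hb] at this
          simp at this
      simp [ht]

theorem check_eq_check_alt (temp : List String) : check temp = check_alt temp := by
  have hflat :
      (PySem.List.pyRange 0 (temp.length : Int) 1).foldl
        (fun acc i => acc ++ (PySem.List.pyGetD temp i "").toList) [] =
      temp.flatMap String.toList := by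
    rw [PySem.List.foldl_pyRange_pyGetD' (xs := temp) (a := 0) (d := "")
        (f := fun (acc : List Char) (s : String) => acc ++ s.toList) (init := []) (by norm_num)]
    simp [List.flatMap]
  unfold check check_alt
  rw [checkGoStrs_eq_flat]
  simp only [hflat]
  cases hf : temp.flatMap String.toList with
  | nil => simp [checkGoChars, PySem.Set.ofList, PySem.Set.len]
  | cons c rest =>
    simp only [checkGoChars, checkGoChars_some]
    by_cases h : rest.all (· == c) = true
    · have h1 : (PySem.Set.ofList (c :: rest)).length = 1 := (set_len_one_iff c rest).mpr h
      simp [h, PySem.Set.len, h1]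
    · have h1 : (PySem.Set.ofList (c :: rest)).length ≠ 1 := fun hc => h ((set_len_one_iff c rest).mp hc)
      simp only [h]
      simp [PySem.Set.len]
      omega

-- ===== VERDICT (by name: the statement is the Claim_ definition above) =====
theorem check_spec : Claim_equal_check := by
  intro temp _
  exact check_eq_check_alt temp
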